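-- pv_equiv track=rewrite | github.com/najibullahjafari/Codeforces-solutions | solved_problems/def can_form_decks(deck_size, total_card.py | max_deck_size
-- ===== SOURCE A (Python) =====
-- def can_form_decks(deck_size, total_cards, k, a):
--     needed_cards = 0
--     for count in a:
--         if count < deck_size:
--             needed_cards += deck_size - count
--         if needed_cards > k:
--             return False
--     return needed_cards <= k
--
-- def max_deck_size(n, k, a):
--     total_cards = sum(a)
--     left, right = 1, total_cards + k
--     while left < right:
--         mid = (left + right + 1) // 2
--         if can_form_decks(mid, total_cards, k, a):
--             left = mid
--         else:
--             right = mid - 1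
--     return left
-- ===== SOURCE B (Python) =====
-- def _bisect_left(sa, d):
--     lo, hi = 0, len(sa)
--     while lo < hi:
--         m = (lo + hi) // 2
--         if sa[m] < d:
--             lo = m + 1
--         else:
--             hi = m
--     return lo
--
-- def max_deck_size(n, k, a):
--     sa = sorted(a)
--     pref = [0]
--     for c in sa:
--         pref.append(pref[-1] + c)
--     total = pref[-1]
--     left, right = 1, total + k
--     while left < right:
--         mid = (left + right + 1) // 2
--         i = _bisect_left(sa, mid)
--         if mid * i - pref[i] <= k:
--             left = mid
--         else:
--             right = mid - 1
--     return left
-- ===== Notes on version B (the rewrite author's own statement) =====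
-- stated objective: alternative
-- what changed: B sorts the list once and builds prefix sums, then each binary-search step computes the needed padding with a hand-written bisect and a closed formula (mid*i - pref[i]) instead of A's early-exiting scan over the whole list; the per-step cost trades an O(n) scan for an O(log n) lookup at the price of an O(n log n) preprocessing pass.
import Mathlib
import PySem

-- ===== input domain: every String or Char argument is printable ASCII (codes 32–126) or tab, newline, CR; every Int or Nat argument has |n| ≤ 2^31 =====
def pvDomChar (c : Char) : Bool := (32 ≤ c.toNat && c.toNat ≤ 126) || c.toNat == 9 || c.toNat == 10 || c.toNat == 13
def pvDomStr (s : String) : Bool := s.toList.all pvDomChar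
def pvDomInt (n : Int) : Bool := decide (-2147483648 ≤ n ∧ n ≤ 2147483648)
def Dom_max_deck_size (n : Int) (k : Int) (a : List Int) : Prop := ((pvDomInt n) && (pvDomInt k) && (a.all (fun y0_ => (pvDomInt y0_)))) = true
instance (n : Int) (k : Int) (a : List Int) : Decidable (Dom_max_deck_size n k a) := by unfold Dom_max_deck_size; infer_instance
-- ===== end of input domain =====

-- B evaluates each binary-search step's feasibility check via sort + prefix sums + bisect instead of A's early-exiting scan (alternative algorithm, not measured faster).

-- ===== PORT A =====
def cfdLoop (deck_size k needed : Int) : List Int → Bool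
  | [] => decide (needed ≤ k)
  | count :: rest =>
    let needed' := if count < deck_size then needed + (deck_size - count) else needed
    if needed' > k then false else cfdLoop deck_size k needed' rest

def can_form_decks (deck_size total_cards k : Int) (a : List Int) : Bool :=
  cfdLoop deck_size k 0 a

def bsLoopA (total_cards k : Int) (a : List Int) (left right : Int) : Int :=
  if h : left < right then
    let mid := PySem.Int.floordiv (left + right + 1) 2
    if can_form_decks mid total_cards k a then bsLoopA total_cards k a mid right
    else bsLoopA total_cards k a left (mid - 1)
  else left
termination_by (right - left).toNat
decreasing_by
  · have h2 : PySem.Int.floordiv (left + right + 1) 2 = (left + right + 1) / 2 :=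
      PySem.Int.floordiv_eq_ediv_of_pos (by omega)
    omega
  · have h2 : PySem.Int.floordiv (left + right + 1) 2 = (left + right + 1) / 2 :=
      PySem.Int.floordiv_eq_ediv_of_pos (by omega)
    omega

def max_deck_size (n : Int) (k : Int) (a : List Int) : Int :=
  let total_cards := a.sum
  bsLoopA total_cards k a 1 (total_cards + k)

-- ===== PORT B =====
def bisectLeftLoop (sa : List Int) (d : Int) (lo hi : Nat) : Nat :=
  if h : lo < hi then
    let m := (lo + hi) / 2
    if sa.getD m 0 < d then bisectLeftLoop sa d (m + 1) hi
    else bisectLeftLoop sa d lo m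
  else lo
termination_by hi - lo
decreasing_by all_goals omega

def bsLoopB (k : Int) (sa pref : List Int) (left right : Int) : Int :=
  if h : left < right then
    let mid := PySem.Int.floordiv (left + right + 1) 2
    let i := bisectLeftLoop sa mid 0 sa.length
    if mid * (i : Int) - PySem.List.pyGetD pref (i : Int) 0 ≤ k then bsLoopB k sa pref mid right
    else bsLoopB k sa pref left (mid - 1)
  else left
termination_by (right - left).toNat
decreasing_by
  · have h2 : PySem.Int.floordiv (left + right + 1) 2 = (left + right + 1) / 2 :=
      PySem.Int.floordiv_eq_ediv_of_pos (by omega)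
    omega
  · have h2 : PySem.Int.floordiv (left + right + 1) 2 = (left + right + 1) / 2 :=
      PySem.Int.floordiv_eq_ediv_of_pos (by omega)
    omega

def max_deck_size_alt (n : Int) (k : Int) (a : List Int) : Int :=
  let sa := PySem.List.sorted a (fun x => x) false
  let pref := sa.foldl (fun p c => p ++ [PySem.List.pyGetD p (-1) 0 + c]) [0]
  let total := PySem.List.pyGetD pref (-1) 0
  bsLoopB k sa pref 1 (total + k)

-- ===== PRECONDITION & SPEC =====
def Spec_max_deck_size (n : Int) (k : Int) (a : List Int) (out : Int) : Prop := out = max_deck_size_alt n k a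
instance (n : Int) (k : Int) (a : List Int) (out : Int) : Decidable (Spec_max_deck_size n k a out) := by unfold Spec_max_deck_size; infer_instance

-- ===== CLAIM (what is proved, stated in full; the proofs are below) =====
def Claim_equal_max_deck_size : Prop := ∀ (n : Int) (k : Int) (a : List Int), Dom_max_deck_size n k a → Spec_max_deck_size n k a (max_deck_size n k a)

-- ===== LEMMAS AND PROOFS =====

-- total padding needed for deck size d
def needS (d : Int) (xs : List Int) : Int := (xs.map (fun c => if c < d then d - c else 0)).sum

theorem needS_nonneg (d : Int) (xs : List Int) : 0 ≤ needS d xs := by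
  induction xs with
  | nil => simp [needS]
  | cons c t ih =>
    simp only [needS, List.map_cons, List.sum_cons] at *
    split_ifs with h <;> omega

theorem cfdLoop_eq (d k : Int) (xs : List Int) : ∀ needed : Int,
    cfdLoop d k needed xs = decide (needed + needS d xs ≤ k) := by
  induction xs with
  | nil => intro needed; simp [cfdLoop, needS]
  | cons c t ih =>
    intro needed
    have hS := needS_nonneg d t
    simp only [cfdLoop, needS, List.map_cons, List.sum_cons]
    by_cases hc : c < d <;> simp only [hc, if_true, if_false] <;> split_ifs with hk
    · symm; simp only [decide_eq_false_iff_not]; unfold needS at hS; omega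
    · rw [ih, decide_eq_decide]; unfold needS; omega
    · symm; simp only [decide_eq_false_iff_not]; unfold needS at hS; omega
    · rw [ih, decide_eq_decide]; unfold needS; omega

-- running prefix sums starting from s
def psums (s : Int) : List Int → List Int
  | [] => []
  | c :: xs => (s + c) :: psums (s + c) xs

theorem psums_length (s : Int) (xs : List Int) : (psums s xs).length = xs.length := by
  induction xs generalizing s with
  | nil => rfl
  | cons c t ih => simp [psums, ih]

theorem foldl_pref (xs : List Int) : ∀ (acc : List Int) (s : Int), acc.getLast? = some s →
    xs.foldl (fun p c => p ++ [PySem.List.pyGetD p (-1) 0 + c]) acc = acc ++ psums s xs := by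
  induction xs with
  | nil => intro acc s _; simp [psums]
  | cons c t ih =>
    intro acc s hs
    have hne : acc ≠ [] := by intro h; simp [h] at hs
    have hlast : PySem.List.pyGetD acc (-1) 0 = s := by
      rw [PySem.List.pyGetD_neg_one acc 0 hne]
      rw [List.getLast?_eq_some_getLast hne] at hs
      exact (Option.some_injective _ hs)
    simp only [List.foldl_cons, hlast]
    rw [ih (acc ++ [s + c]) (s + c) (by simp)]
    simp [psums]

theorem psums_getD (xs : List Int) : ∀ (s : Int) (i : Nat), i ≤ xs.length →
    (s :: psums s xs).getD i 0 = s + (xs.take i).sum := by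
  induction xs with
  | nil =>
    intro s i hi
    have : i = 0 := Nat.le_zero.mp hi
    subst this; simp
  | cons c t ih =>
    intro s i hi
    cases i with
    | zero => simp
    | succ j =>
      simp only [psums, List.getD_cons_succ, List.take_succ_cons, List.sum_cons]
      have := ih (s + c) j (by simpa using hi)
      omega

-- bisect loop invariant: result r splits sa into a prefix < d and a suffix ≥ d
theorem bisect_inv (sa : List Int) (hpw : sa.Pairwise (· ≤ ·)) (d : Int) :
    ∀ (fuel lo hi : Nat), hi - lo ≤ fuel → lo ≤ hi → hi ≤ sa.length →
    (∀ j, j < lo → sa.getD j 0 < d) →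
    (∀ j, hi ≤ j → j < sa.length → ¬ sa.getD j 0 < d) →
    bisectLeftLoop sa d lo hi ≤ sa.length ∧
    (∀ j, j < bisectLeftLoop sa d lo hi → sa.getD j 0 < d) ∧
    (∀ j, bisectLeftLoop sa d lo hi ≤ j → j < sa.length → ¬ sa.getD j 0 < d) := by
  have hmono : ∀ i j : Nat, i ≤ j → j < sa.length → sa.getD i 0 ≤ sa.getD j 0 := by
    intro i j hij hj
    rcases Nat.eq_or_lt_of_le hij with rfl | hlt
    · exact le_rfl
    · have hi : i < sa.length := lt_trans hlt hj
      rw [List.getD_eq_getElem _ _ hi, List.getD_eq_getElem _ _ hj]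
      exact List.pairwise_iff_getElem.mp hpw i j hi hj hlt
  intro fuel
  induction fuel with
  | zero =>
    intro lo hi hf hle hhi hlo hhiP
    have : lo = hi := by omega
    subst this
    rw [bisectLeftLoop]
    simp only [lt_irrefl, dite_false]
    exact ⟨by omega, hlo, hhiP⟩
  | succ f ih =>
    intro lo hi hf hle hhi hlo hhiP
    rw [bisectLeftLoop]
    by_cases h : lo < hi
    · simp only [h, dite_true]
      set m := (lo + hi) / 2 with hm
      have hmlt : m < sa.length := by omega
      by_cases hc : sa.getD m 0 < d
      · simp only [hc, if_true]
        refine ih (m + 1) hi (by omega) (by omega) hhi ?_ hhiP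
        intro j hj
        exact lt_of_le_of_lt (hmono j m (by omega) hmlt) hc
      · simp only [hc, if_false]
        refine ih lo m (by omega) (by omega) (by omega) hlo ?_
        intro j hj hjl
        exact fun hlt => hc (lt_of_le_of_lt (hmono m j hj hjl) hlt) |>.elim
    · simp only [h, dite_false]
      have : lo = hi := by omega
      subst this
      exact ⟨by omega, hlo, hhiP⟩

theorem needS_all_lt (d : Int) (xs : List Int) (h : ∀ c ∈ xs, c < d) :
    needS d xs = d * xs.length - xs.sum := by
  induction xs with
  | nil => simp [needS]
  | cons c t ih =>
    have hc : c < d := h c (by simp)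
    have := ih (fun x hx => h x (by simp [hx]))
    simp only [needS, List.map_cons, List.sum_cons, List.length_cons] at *
    rw [if_pos hc, this]
    push_cast
    ring

theorem needS_none_lt (d : Int) (xs : List Int) (h : ∀ c ∈ xs, ¬ c < d) :
    needS d xs = 0 := by
  induction xs with
  | nil => simp [needS]
  | cons c t ih =>
    have hc : ¬ c < d := h c (by simp)
    have := ih (fun x hx => h x (by simp [hx]))
    simp only [needS, List.map_cons, List.sum_cons] at *
    rw [if_neg hc]
    omega

theorem needS_append (d : Int) (xs ys : List Int) :
    needS d (xs ++ ys) = needS d xs + needS d ys := by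
  simp [needS]

theorem needS_split (d : Int) (sa : List Int) (r : Nat) (hr : r ≤ sa.length)
    (h1 : ∀ j, j < r → sa.getD j 0 < d)
    (h2 : ∀ j, r ≤ j → j < sa.length → ¬ sa.getD j 0 < d) :
    needS d sa = d * r - (sa.take r).sum := by
  have htake : ∀ c ∈ sa.take r, c < d := by
    intro c hc
    obtain ⟨i, hi, hget⟩ := List.mem_iff_getElem.mp hc
    rw [List.length_take] at hi
    have hil : i < r := by omega
    have hisa : i < sa.length := by omega
    rw [List.getElem_take] at hget
    have := h1 i hil
    rw [List.getD_eq_getElem _ _ hisa] at this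
    rw [← hget]; exact this
  have hdrop : ∀ c ∈ sa.drop r, ¬ c < d := by
    intro c hc
    obtain ⟨i, hi, hget⟩ := List.mem_iff_getElem.mp hc
    rw [List.getElem_drop] at hget
    rw [List.length_drop] at hi
    have hisa : r + i < sa.length := by omega
    have := h2 (r + i) (by omega) hisa
    rw [List.getD_eq_getElem _ _ hisa] at this
    rw [← hget]; exact this
  have hsplit : sa = sa.take r ++ sa.drop r := (List.take_append_drop r sa).symm
  conv_lhs => rw [hsplit]
  rw [needS_append, needS_all_lt d _ htake, needS_none_lt d _ hdrop,
    List.length_take]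
  have : min r sa.length = r := by omega
  rw [this]
  ring

theorem loops_eq (total k : Int) (a sa pref : List Int)
    (hpred : ∀ m : Int, can_form_decks m total k a =
      decide (m * ((bisectLeftLoop sa m 0 sa.length : Nat) : Int) -
        PySem.List.pyGetD pref ((bisectLeftLoop sa m 0 sa.length : Nat) : Int) 0 ≤ k)) :
    ∀ (fuel : Nat) (l r : Int), (r - l).toNat ≤ fuel →
      bsLoopA total k a l r = bsLoopB k sa pref l r := by
  intro fuel
  induction fuel with
  | zero =>
    intro l r hf
    have h : ¬ l < r := by omega
    rw [bsLoopA, bsLoopB]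
    simp [h]
  | succ f ih =>
    intro l r hf
    rw [bsLoopA, bsLoopB]
    by_cases h : l < r
    · simp only [h, dite_true]
      have hfd : PySem.Int.floordiv (l + r + 1) 2 = (l + r + 1) / 2 :=
        PySem.Int.floordiv_eq_ediv_of_pos (by omega)
      have hb : l < PySem.Int.floordiv (l + r + 1) 2 ∧
          PySem.Int.floordiv (l + r + 1) 2 ≤ r := by rw [hfd]; omega
      rw [hpred (PySem.Int.floordiv (l + r + 1) 2)]
      simp only [decide_eq_true_eq]
      split_ifs with hp
      · exact ih _ _ (by omega)
      · exact ih _ _ (by omega)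
    · simp [h]

theorem max_deck_size_spec : Claim_equal_max_deck_size := by
  unfold Claim_equal_max_deck_size Spec_max_deck_size
  intro n k a _
  simp only [max_deck_size, max_deck_size_alt]
  -- name the sorted list
  set sa := PySem.List.sorted a (fun x => x) false with hsa
  have hperm : sa.Perm a := PySem.List.sorted_perm a _ false
  have hpw : sa.Pairwise (· ≤ ·) := by
    simpa using PySem.List.sorted_pairwise a (fun x => x)
  have hpref : sa.foldl (fun p c => p ++ [PySem.List.pyGetD p (-1) 0 + c]) [0]
      = (0 : Int) :: psums 0 sa := by
    rw [foldl_pref sa [0] 0 (by simp)]; rfl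
  rw [hpref]
  have hgetD : ∀ i : Nat, i ≤ sa.length →
      ((0 : Int) :: psums 0 sa).getD i 0 = (sa.take i).sum := by
    intro i hi
    rw [psums_getD sa 0 i hi]; omega
  -- the two searches start from the same right endpoint
  have hlen : ((0 : Int) :: psums 0 sa).length = sa.length + 1 := by
    simp [psums_length]
  have htotal : PySem.List.pyGetD ((0 : Int) :: psums 0 sa) (-1) 0 = a.sum := by
    have hne : ((0 : Int) :: psums 0 sa) ≠ [] := by simp
    rw [PySem.List.pyGetD_neg_one _ 0 hne, List.getLast_eq_getElem,
      ← List.getD_eq_getElem _ 0 (by omega)]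
    have : ((0 : Int) :: psums 0 sa).length - 1 = sa.length := by omega
    rw [this, hgetD sa.length le_rfl, List.take_length]
    exact hperm.sum_eq
  rw [htotal]
  -- the two feasibility predicates agree
  have hneedS_perm : ∀ m : Int, needS m a = needS m sa := by
    intro m
    exact (List.Perm.sum_eq (List.Perm.map _ hperm)).symm
  apply loops_eq
  · intro m
    obtain ⟨hr1, hr2, hr3⟩ := bisect_inv sa hpw m sa.length 0 sa.length
      (by omega) (by omega) (by omega) (by intro j hj; omega)
      (by intro j hj hj2; omega)
    set i := bisectLeftLoop sa m 0 sa.length with hi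
    rw [can_form_decks, cfdLoop_eq, decide_eq_decide]
    rw [PySem.List.pyGetD_natCast, hgetD i hr1]
    have := needS_split m sa i hr1 hr2 hr3
    have := hneedS_perm m
    omega
  · exact le_rfl
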